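-- pv_equiv track=rewrite | github.com/k-harada/AtCoder | other_contests/PAST202004/D.py | solve
-- ===== SOURCE A (Python) =====
-- def solve(s):
--     res_dict = dict()
--     n = len(s)
--     # 1
--     for i in range(n):
--         k = s[i]
--         res_dict[k] = 1
--     res_dict["."] = 1
--     # 2
--     for i in range(n - 1):
--         k1 = s[i]
--         k2 = s[i + 1]
--         res_dict[k1 + k2] = 1
--         res_dict[k1 + "."] = 1
--         res_dict["." + k2] = 1
--     if n >= 2:
--         res_dict[".."] = 1
--     # 3
--     for i in range(n - 2):
--         k1 = s[i]
--         k2 = s[i + 1]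
--         k3 = s[i + 2]
--         res_dict[k1 + k2 + k3] = 1
--         res_dict["." + k2 + k3] = 1
--         res_dict[k1 + "." + k3] = 1
--         res_dict[k1 + k2 + "."] = 1
--         res_dict["." + "." + k3] = 1
--         res_dict["." + k2 + "."] = 1
--         res_dict[k1 + "." + "."] = 1
--     if n >= 3:
--         res_dict["..."] = 1
--     return len(res_dict)
-- ===== SOURCE B (Python) =====
-- def solve(s):
--     n = len(s)
--     alphabet = set(s) | {"."}
--     # projection index: for each window length L and each tuple of kept positions,
--     # the set of character tuples s realises on those positions inside some window
--     proj = {}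
--     for L in (1, 2, 3):
--         subsets = [()]
--         for j in range(L):
--             subsets = subsets + [ss + (j,) for ss in subsets]
--         for ss in subsets:
--             proj[(L, ss)] = {tuple(s[i + j] for j in ss) for i in range(n - L + 1)}
--     # generate every candidate pattern over the observed alphabet plus the wildcard,
--     # and count the ones that occur somewhere (one index lookup each)
--     count = 0
--     cands = [""]
--     for L in (1, 2, 3):
--         cands = [p + c for p in cands for c in alphabet]
--         for p in cands:
--             kept = tuple(j for j in range(L) if p[j] != ".")
--             if tuple(p[j] for j in kept) in proj[(L, kept)]:
--                 count += 1
--     return count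
-- ===== Notes on version B (the rewrite author's own statement) =====
-- stated objective: alternative
-- what changed: Instead of enumerating the dot-masked variants of every window into a set and returning its size, B builds per-shape projection indices (sets of character tuples each window realises on each subset of positions), then generates every candidate pattern of length 1..3 over the observed alphabet plus the wildcard and counts those whose kept-position projection occurs in the matching index.
-- intended difference: On the empty string A returns 1 because it unconditionally inserts the single-dot wildcard pattern even though no window of the string matches it, while B returns 0, the number of patterns actually occurring, which is the intended count. — e.g. on solve(""): A returns 1, B returns 0
import Mathlib
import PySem

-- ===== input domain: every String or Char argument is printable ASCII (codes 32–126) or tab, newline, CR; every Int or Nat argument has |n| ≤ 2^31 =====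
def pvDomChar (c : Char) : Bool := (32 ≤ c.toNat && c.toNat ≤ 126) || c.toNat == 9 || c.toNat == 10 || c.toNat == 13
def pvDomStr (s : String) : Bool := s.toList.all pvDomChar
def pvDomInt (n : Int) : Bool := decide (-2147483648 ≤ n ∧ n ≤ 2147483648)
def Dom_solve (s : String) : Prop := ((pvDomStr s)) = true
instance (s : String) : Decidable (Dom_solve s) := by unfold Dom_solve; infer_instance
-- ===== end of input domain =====

-- B replaces A's per-window enumeration of dot-masked variants by projection indices plus
-- generate-and-test over candidate patterns; objective: alternative (not faster).

-- ===== PORT A =====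
def solve (s : String) : Int :=
  let l := s.toList
  let n : Int := PySem.Str.len s
  let d : PySem.Dict (List Char) Int := PySem.Dict.empty
  -- 1
  let d := (PySem.List.pyRange 0 n 1).foldl (fun d i =>
      let k := PySem.List.pyGetD l i ' '       -- s[i]; i is always in range here
      d.insert [k] 1) d
  let d := d.insert ['.'] 1
  -- 2
  let d := (PySem.List.pyRange 0 (n - 1) 1).foldl (fun d i =>
      let k1 := PySem.List.pyGetD l i ' '
      let k2 := PySem.List.pyGetD l (i + 1) ' '
      ((d.insert [k1, k2] 1).insert [k1, '.'] 1).insert ['.', k2] 1) d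
  let d := if 2 ≤ n then d.insert ['.', '.'] 1 else d
  -- 3
  let d := (PySem.List.pyRange 0 (n - 2) 1).foldl (fun d i =>
      let k1 := PySem.List.pyGetD l i ' '
      let k2 := PySem.List.pyGetD l (i + 1) ' '
      let k3 := PySem.List.pyGetD l (i + 2) ' '
      ((((((d.insert [k1, k2, k3] 1).insert ['.', k2, k3] 1).insert [k1, '.', k3] 1).insert
          [k1, k2, '.'] 1).insert ['.', '.', k3] 1).insert ['.', k2, '.'] 1).insert [k1, '.', '.'] 1) d
  let d := if 3 ≤ n then d.insert ['.', '.', '.'] 1 else d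
  (PySem.Dict.size d : Int)

-- ===== PORT B =====
-- B-side helpers: the named pieces of Source B's single function, with identical code
-- (B's result, a count, does not depend on the iteration order of the Python sets it loops over).
-- alphabet = set(s) | {"."}
def alphaB (l : List Char) : PySem.Set Char :=
  PySem.Set.union (PySem.Set.ofList l) (PySem.Set.ofList ['.'])

-- the set comprehension {tuple(s[i+j] for j in ss) for i in range(n - L + 1)}
def projSetB (l : List Char) (L : Int) (ss : List Int) : PySem.Set (List Char) :=
  (PySem.List.pyRange 0 ((l.length : Int) - L + 1) 1).foldl
    (fun acc i => PySem.Set.add acc (ss.map (fun j => PySem.List.pyGetD l (i + j) ' ')))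
    PySem.Set.empty

-- the projection index proj: for each window length L and tuple of kept positions,
-- the set of character tuples realised on those positions inside some window
def projB (l : List Char) : PySem.Dict (Int × List Int) (PySem.Set (List Char)) :=
  [(1 : Int), 2, 3].foldl (fun proj L =>
    let subsets := (PySem.List.pyRange 0 L 1).foldl
        (fun subsets j => subsets ++ subsets.map (fun ss => ss ++ [j])) [([] : List Int)]
    subsets.foldl (fun proj ss => proj.insert (L, ss) (projSetB l L ss)) proj) PySem.Dict.empty

-- the loop-body condition: kept = positions of p that are not ".", then one index lookup
-- (proj[(L, kept)] never raises: every kept tuple was inserted, so getD with an empty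
-- default is exact)
def testB (l : List Char) (L : Int) (p : List Char) : Bool :=
  let kept := (PySem.List.pyRange 0 L 1).filter (fun j => !(PySem.List.pyGetD p j ' ' == '.'))
  PySem.Set.contains ((projB l).getD (L, kept) PySem.Set.empty)
    (kept.map (fun j => PySem.List.pyGetD p j ' '))

-- cands = [p + c for p in cands for c in alphabet]
def extB (l : List Char) (cs : List (List Char)) : List (List Char) :=
  cs.flatMap (fun p => (alphaB l).map (fun c => p ++ [c]))

def solve_alt (s : String) : Int :=
  let l := s.toList
  let res := [(1 : Int), 2, 3].foldl (fun (st : List (List Char) × Int) L =>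
      let cands := extB l st.1
      let count := cands.foldl (fun count p =>
          if testB l L p then count + 1 else count) st.2
      (cands, count)) ([([] : List Char)], (0 : Int))
  res.2

-- ===== PRECONDITION & SPEC =====
-- On the empty string A returns 1 (it unconditionally inserts the single-dot wildcard pattern
-- although no window matches it) while B returns 0, the number of patterns actually
-- occurring, which is the intended count.
def D_solve (s : String) : Prop := s = ""
instance (s : String) : Decidable (D_solve s) := by unfold D_solve; infer_instance
def Spec_solve (s : String) (out : Int) : Prop := ¬ D_solve s → out = solve_alt s
instance (s : String) (out : Int) : Decidable (Spec_solve s out) := by unfold Spec_solve; infer_instance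
def pvDiffWitness_solve : String := ""
def pvDiffWitnessOut_solve : Int × Int := (1, 0)

-- ===== CLAIM (what is proved, stated in full; the proofs are below) =====
def Claim_unchanged_solve : Prop := ∀ (s : String), Dom_solve s → Spec_solve s (solve s)
def Claim_changed_solve : Prop := Dom_solve (pvDiffWitness_solve) ∧ D_solve (pvDiffWitness_solve) ∧ solve (pvDiffWitness_solve) = pvDiffWitnessOut_solve.1 ∧ solve_alt (pvDiffWitness_solve) = pvDiffWitnessOut_solve.2 ∧ pvDiffWitnessOut_solve.1 ≠ pvDiffWitnessOut_solve.2
def Claim_exact_solve : Prop := ∀ (s : String), Dom_solve s → D_solve s → solve s ≠ solve_alt s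

-- ===== LEMMAS AND PROOFS =====

-- generic: membership transport through a foldl
theorem foldl_step_iff {α σ κ : Type} (g : σ → α → σ) (P : σ → κ → Prop) (F : α → κ → Prop)
    (h : ∀ s x k, P (g s x) k ↔ P s k ∨ F x k) :
    ∀ (l : List α) (s : σ) (k : κ), P (l.foldl g s) k ↔ P s k ∨ ∃ x ∈ l, F x k := by
  intro l
  induction l with
  | nil => simp
  | cons a t ih =>
    intro s k
    simp only [List.foldl_cons, ih, h, List.mem_cons]
    constructor
    · rintro ((hP | hF) | ⟨x, hx, hFx⟩)
      · exact .inl hP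
      · exact .inr ⟨a, .inl rfl, hF⟩
      · exact .inr ⟨x, .inr hx, hFx⟩
    · rintro (hP | ⟨x, (rfl | hx), hFx⟩)
      · exact .inl (.inl hP)
      · exact .inl (.inr hFx)
      · exact .inr ⟨x, hx, hFx⟩

theorem foldl_pres {α σ : Type} (g : σ → α → σ) (Q : σ → Prop)
    (h : ∀ s x, Q s → Q (g s x)) : ∀ (l : List α) (s : σ), Q s → Q (l.foldl g s) := by
  intro l
  induction l with
  | nil => intro s hs; exact hs
  | cons a t ih => intro s hs; exact ih _ (h _ _ hs)

-- the canonical membership predicate A's dict realises (g j = the j-th character)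
def PatP (l : List Char) (k : List Char) : Prop :=
  let g : Nat → Char := fun j => l.getD j ' '
  k = ['.']
  ∨ (∃ j : Nat, j + 1 ≤ l.length ∧ k = [g j])
  ∨ (∃ j : Nat, j + 2 ≤ l.length ∧
       k ∈ [[g j, g (j+1)], [g j, '.'], ['.', g (j+1)], ['.', '.']])
  ∨ (∃ j : Nat, j + 3 ≤ l.length ∧
       k ∈ [[g j, g (j+1), g (j+2)], ['.', g (j+1), g (j+2)], [g j, '.', g (j+2)],
            [g j, g (j+1), '.'], ['.', '.', g (j+2)], ['.', g (j+1), '.'],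
            [g j, '.', '.'], ['.', '.', '.']])

-- A's final dict (the pipeline of solve, without the size)
def dictA (l : List Char) : PySem.Dict (List Char) Int :=
  let n : Int := (l.length : Int)
  let d : PySem.Dict (List Char) Int := PySem.Dict.empty
  let d := (PySem.List.pyRange 0 n 1).foldl (fun d i =>
      let k := PySem.List.pyGetD l i ' '
      d.insert [k] 1) d
  let d := d.insert ['.'] 1
  let d := (PySem.List.pyRange 0 (n - 1) 1).foldl (fun d i =>
      let k1 := PySem.List.pyGetD l i ' '
      let k2 := PySem.List.pyGetD l (i + 1) ' '
      ((d.insert [k1, k2] 1).insert [k1, '.'] 1).insert ['.', k2] 1) d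
  let d := if 2 ≤ n then d.insert ['.', '.'] 1 else d
  let d := (PySem.List.pyRange 0 (n - 2) 1).foldl (fun d i =>
      let k1 := PySem.List.pyGetD l i ' '
      let k2 := PySem.List.pyGetD l (i + 1) ' '
      let k3 := PySem.List.pyGetD l (i + 2) ' '
      ((((((d.insert [k1, k2, k3] 1).insert ['.', k2, k3] 1).insert [k1, '.', k3] 1).insert
          [k1, k2, '.'] 1).insert ['.', '.', k3] 1).insert ['.', k2, '.'] 1).insert [k1, '.', '.'] 1) d
  if 3 ≤ n then d.insert ['.', '.', '.'] 1 else d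

theorem solve_eq_dictA (s : String) : solve s = ((dictA s.toList).size : Int) := rfl

theorem mem_keys_if_insert (c : Prop) [Decidable c] (d : PySem.Dict (List Char) Int)
    (x k : List Char) (v : Int) :
    k ∈ (if c then d.insert x v else d).keys ↔ (c ∧ k = x) ∨ k ∈ d.keys := by
  split_ifs with hc
  · rw [PySem.Dict.mem_keys_insert]; tauto
  · tauto

theorem pyGetD_cast_one (l : List Char) (j : Nat) :
    PySem.List.pyGetD l ((j : Int) + 1) ' ' = l.getD (j + 1) ' ' := by
  rw [show ((j : Int) + 1) = (((j + 1 : Nat) : Int)) by push_cast; ring,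
    PySem.List.pyGetD_natCast]

theorem pyGetD_cast_two (l : List Char) (j : Nat) :
    PySem.List.pyGetD l ((j : Int) + 2) ' ' = l.getD (j + 2) ' ' := by
  rw [show ((j : Int) + 2) = (((j + 2 : Nat) : Int)) by push_cast; ring,
    PySem.List.pyGetD_natCast]

theorem mem_dictA (l : List Char) (k : List Char) : k ∈ (dictA l).keys ↔ PatP l k := by
  unfold dictA
  rw [mem_keys_if_insert,
    foldl_step_iff _ (fun (d : PySem.Dict (List Char) Int) k => k ∈ d.keys)
      (fun (i : Int) (k : List Char) =>
        k ∈ [[PySem.List.pyGetD l i ' ', PySem.List.pyGetD l (i+1) ' ', PySem.List.pyGetD l (i+2) ' '],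
             ['.', PySem.List.pyGetD l (i+1) ' ', PySem.List.pyGetD l (i+2) ' '],
             [PySem.List.pyGetD l i ' ', '.', PySem.List.pyGetD l (i+2) ' '],
             [PySem.List.pyGetD l i ' ', PySem.List.pyGetD l (i+1) ' ', '.'],
             ['.', '.', PySem.List.pyGetD l (i+2) ' '],
             ['.', PySem.List.pyGetD l (i+1) ' ', '.'],
             [PySem.List.pyGetD l i ' ', '.', '.']])
      (fun d i k => by simp only [PySem.Dict.mem_keys_insert, List.mem_cons, List.mem_nil_iff]; tauto),
    mem_keys_if_insert,
    foldl_step_iff _ (fun (d : PySem.Dict (List Char) Int) k => k ∈ d.keys)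
      (fun (i : Int) (k : List Char) =>
        k ∈ [[PySem.List.pyGetD l i ' ', PySem.List.pyGetD l (i+1) ' '],
             [PySem.List.pyGetD l i ' ', '.'],
             ['.', PySem.List.pyGetD l (i+1) ' ']])
      (fun d i k => by simp only [PySem.Dict.mem_keys_insert, List.mem_cons, List.mem_nil_iff]; tauto),
    PySem.Dict.mem_keys_insert,
    foldl_step_iff _ (fun (d : PySem.Dict (List Char) Int) k => k ∈ d.keys)
      (fun (i : Int) (k : List Char) => k = [PySem.List.pyGetD l i ' '])
      (fun d i k => by simp only [PySem.Dict.mem_keys_insert]; tauto)]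
  simp only [PySem.List.pyRange_one, List.mem_map, List.mem_range, zero_add, sub_zero,
    PySem.Dict.keys_empty, List.not_mem_nil, false_or, exists_exists_and_eq_and,
    PySem.List.pyGetD_natCast, pyGetD_cast_one, pyGetD_cast_two, Int.toNat_natCast,
    List.mem_cons, PatP]
  constructor
  · rintro (⟨h3, rfl⟩ | (⟨h2, rfl⟩ | ((rfl | ⟨j, hj, rfl⟩) | ⟨j, hj, hk⟩)) | ⟨j, hj, hk⟩)
    · exact .inr (.inr (.inr ⟨0, by omega, by simp⟩))
    · exact .inr (.inr (.inl ⟨0, by omega, by simp⟩))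
    · exact .inl rfl
    · exact .inr (.inl ⟨j, by omega, rfl⟩)
    · rcases hk with rfl | rfl | rfl | h
      · exact .inr (.inr (.inl ⟨j, by omega, by simp⟩))
      · exact .inr (.inr (.inl ⟨j, by omega, by simp⟩))
      · exact .inr (.inr (.inl ⟨j, by omega, by simp⟩))
      · exact h.elim
    · rcases hk with rfl | rfl | rfl | rfl | rfl | rfl | rfl | h
      · exact .inr (.inr (.inr ⟨j, by omega, by simp⟩))
      · exact .inr (.inr (.inr ⟨j, by omega, by simp⟩))
      · exact .inr (.inr (.inr ⟨j, by omega, by simp⟩))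
      · exact .inr (.inr (.inr ⟨j, by omega, by simp⟩))
      · exact .inr (.inr (.inr ⟨j, by omega, by simp⟩))
      · exact .inr (.inr (.inr ⟨j, by omega, by simp⟩))
      · exact .inr (.inr (.inr ⟨j, by omega, by simp⟩))
      · exact h.elim
  · rintro (rfl | ⟨j, hj, rfl⟩ | ⟨j, hj, hk⟩ | ⟨j, hj, hk⟩)
    · exact .inr (.inl (.inr (.inl (.inl rfl))))
    · exact .inr (.inl (.inr (.inl (.inr ⟨j, by omega, rfl⟩))))
    · rcases hk with rfl | rfl | rfl | rfl | h
      · exact .inr (.inl (.inr (.inr ⟨j, by omega, by simp⟩)))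
      · exact .inr (.inl (.inr (.inr ⟨j, by omega, by simp⟩)))
      · exact .inr (.inl (.inr (.inr ⟨j, by omega, by simp⟩)))
      · exact .inr (.inl (.inl ⟨by omega, rfl⟩))
      · exact h.elim
    · rcases hk with rfl | rfl | rfl | rfl | rfl | rfl | rfl | rfl | h
      · exact .inr (.inr ⟨j, by omega, by simp⟩)
      · exact .inr (.inr ⟨j, by omega, by simp⟩)
      · exact .inr (.inr ⟨j, by omega, by simp⟩)
      · exact .inr (.inr ⟨j, by omega, by simp⟩)
      · exact .inr (.inr ⟨j, by omega, by simp⟩)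
      · exact .inr (.inr ⟨j, by omega, by simp⟩)
      · exact .inr (.inr ⟨j, by omega, by simp⟩)
      · exact .inl ⟨by omega, rfl⟩
      · exact h.elim

theorem nodup_if_insert (c : Prop) [Decidable c] (d : PySem.Dict (List Char) Int) (k : List Char)
    (v : Int) (h : d.keys.Nodup) : (if c then d.insert k v else d).keys.Nodup := by
  split_ifs
  · exact PySem.Dict.nodup_keys_insert d k v h
  · exact h

theorem nodup_dictA (l : List Char) : (dictA l).keys.Nodup := by
  unfold dictA
  apply nodup_if_insert
  apply foldl_pres _ (fun d : PySem.Dict (List Char) Int => d.keys.Nodup)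
    (fun d i h => by
      repeat apply PySem.Dict.nodup_keys_insert
      exact h)
  apply nodup_if_insert
  apply foldl_pres _ (fun d : PySem.Dict (List Char) Int => d.keys.Nodup)
    (fun d i h => by
      repeat apply PySem.Dict.nodup_keys_insert
      exact h)
  apply PySem.Dict.nodup_keys_insert
  apply foldl_pres _ (fun d : PySem.Dict (List Char) Int => d.keys.Nodup)
    (fun d i h => by
      repeat apply PySem.Dict.nodup_keys_insert
      exact h)
  exact PySem.Dict.nodup_keys_empty

-- ===== B-side lemmas =====

def candsB (l : List Char) : Nat → List (List Char)
  | 0 => [[]]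
  | L + 1 => extB l (candsB l L)

theorem solve_alt_eq (s : String) :
    solve_alt s =
      (candsB s.toList 3).foldl (fun c p => if testB s.toList 3 p then c + 1 else c)
        ((candsB s.toList 2).foldl (fun c p => if testB s.toList 2 p then c + 1 else c)
          ((candsB s.toList 1).foldl (fun c p => if testB s.toList 1 p then c + 1 else c)
            (0 : Int))) := rfl

theorem projB_eq (l : List Char) : projB l =
    ((((((((((((((PySem.Dict.empty.insert
      ((1 : Int), ([] : List Int)) (projSetB l 1 [])).insert
      (1, [0]) (projSetB l 1 [0])).insert
      (2, []) (projSetB l 2 [])).insert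
      (2, [0]) (projSetB l 2 [0])).insert
      (2, [1]) (projSetB l 2 [1])).insert
      (2, [0, 1]) (projSetB l 2 [0, 1])).insert
      (3, []) (projSetB l 3 [])).insert
      (3, [0]) (projSetB l 3 [0])).insert
      (3, [1]) (projSetB l 3 [1])).insert
      (3, [0, 1]) (projSetB l 3 [0, 1])).insert
      (3, [2]) (projSetB l 3 [2])).insert
      (3, [0, 2]) (projSetB l 3 [0, 2])).insert
      (3, [1, 2]) (projSetB l 3 [1, 2])).insert
      (3, [0, 1, 2]) (projSetB l 3 [0, 1, 2])) := by
  have h1 : PySem.List.pyRange 0 (1 : Int) 1 = [0] := by decide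
  have h2 : PySem.List.pyRange 0 (2 : Int) 1 = [0, 1] := by decide
  have h3 : PySem.List.pyRange 0 (3 : Int) 1 = [0, 1, 2] := by decide
  simp only [projB, List.foldl_cons, List.foldl_nil, h1, h2, h3, List.map_cons, List.map_nil,
    List.cons_append, List.nil_append, List.singleton_append]

theorem mem_projSetB (l : List Char) (L : Int) (ss : List Int) (t : List Char) :
    t ∈ projSetB l L ss ↔
      ∃ i : Int, (0 ≤ i ∧ i < (l.length : Int) - L + 1) ∧
        t = ss.map (fun j => PySem.List.pyGetD l (i + j) ' ') := by
  unfold projSetB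
  rw [PySem.Set.mem_foldl_add]
  simp [PySem.List.mem_pyRange_one, and_assoc]

theorem mem_alphaB (l : List Char) (c : Char) : c ∈ alphaB l ↔ c ∈ l ∨ c = '.' := by
  unfold alphaB
  rw [PySem.Set.mem_union]
  simp [PySem.Set.mem_ofList]

theorem nodup_alphaB (l : List Char) : (alphaB l).Nodup :=
  PySem.Set.nodup_union _ _ (PySem.Set.nodup_ofList l)

theorem mem_candsB (l : List Char) :
    ∀ (L : Nat) (p : List Char),
      p ∈ candsB l L ↔ p.length = L ∧ ∀ c ∈ p, (c ∈ l ∨ c = '.') := by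
  intro L
  induction L with
  | zero =>
    intro p
    constructor
    · intro hp
      have hp' : p = [] := by simpa [candsB] using hp
      subst hp'
      exact ⟨rfl, fun c hc => (List.not_mem_nil hc).elim⟩
    · rintro ⟨hlen, _⟩
      have hp' : p = [] := List.length_eq_zero_iff.1 hlen
      subst hp'
      simp [candsB]
  | succ L ih =>
    intro p
    simp only [candsB, extB, List.mem_flatMap, List.mem_map]
    constructor
    · rintro ⟨q, hq, c, hc, rfl⟩
      rcases (ih q).1 hq with ⟨hlen, hchars⟩
      refine ⟨by simp [hlen], ?_⟩
      intro x hx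
      rcases List.mem_append.1 hx with hx | hx
      · exact hchars x hx
      · rcases List.mem_singleton.1 hx with rfl
        exact (mem_alphaB l x).1 hc
    · rintro ⟨hlen, hchars⟩
      have hne : p ≠ [] := by intro h; subst h; simp at hlen
      refine ⟨p.dropLast, (ih _).2 ⟨by simp [List.length_dropLast, hlen], ?_⟩,
        p.getLast hne, (mem_alphaB l _).2 (hchars _ (List.getLast_mem hne)), ?_⟩
      · intro c hc
        exact hchars c (List.dropLast_sublist p |>.mem hc)
      · exact List.dropLast_append_getLast hne

theorem nodup_candsB (l : List Char) : ∀ L : Nat, (candsB l L).Nodup := by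
  intro L
  induction L with
  | zero => simp [candsB]
  | succ L ih =>
    simp only [candsB, extB]
    rw [List.nodup_flatMap]
    refine ⟨fun q hq => List.Nodup.map (fun c c' h => by simpa using h) (nodup_alphaB l), ?_⟩
    refine List.Pairwise.imp ?_ ih
    · intro q q' hne p hp hp'
      rcases List.mem_map.1 hp with ⟨c, hc, rfl⟩
      rcases List.mem_map.1 hp' with ⟨c', hc', he⟩
      exact hne ((by simpa using congrArg List.dropLast he) : q' = q).symm

-- testB characterisations (one per candidate length)

-- membership of the fourteen projection sets, phrased over Nat window starts
theorem mem_proj_empty (l : List Char) (L : Int) (t : List Char) :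
    t ∈ projSetB l L [] ↔ t = [] ∧ L ≤ (l.length : Int) := by
  rw [mem_projSetB]
  constructor
  · rintro ⟨i, ⟨h0, hl⟩, rfl⟩
    exact ⟨by simp, by omega⟩
  · rintro ⟨rfl, hL⟩
    exact ⟨0, ⟨le_refl _, by omega⟩, by simp⟩

theorem mem_proj_gen (l : List Char) (L : Int) (ss : List Int) (t : List Char)
    (hss : ∀ j ∈ ss, 0 ≤ j) :
    t ∈ projSetB l L ss ↔
      ∃ i : Nat, (i : Int) < (l.length : Int) - L + 1 ∧
        t = ss.map (fun j => l.getD (i + j.toNat) ' ') := by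
  rw [mem_projSetB]
  constructor
  · rintro ⟨i, ⟨h0, hl⟩, rfl⟩
    refine ⟨i.toNat, by omega, ?_⟩
    apply List.map_congr_left
    intro j hj
    rw [show i + j = (((i.toNat + j.toNat : Nat)) : Int) by
        have := hss j hj; omega, PySem.List.pyGetD_natCast]
  · rintro ⟨i, hi, rfl⟩
    refine ⟨(i : Int), ⟨by omega, by omega⟩, ?_⟩
    apply List.map_congr_left
    intro j hj
    rw [show (i : Int) + j = (((i + j.toNat : Nat)) : Int) by
        have := hss j hj; omega, PySem.List.pyGetD_natCast]

theorem testB_one (l : List Char) (a : Char) :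
    testB l 1 [a] = true ↔
      ∃ i : Nat, i + 1 ≤ l.length ∧ (a = '.' ∨ a = l.getD i ' ') := by
  have hr : PySem.List.pyRange 0 (1 : Int) 1 = [0] := by decide
  unfold testB
  rw [hr, projB_eq]
  by_cases ha : a = '.'
  · subst ha
    simp [PySem.Set.contains_iff,
      PySem.Dict.getD_insert,
      List.filter_cons,
      List.filter_nil,
      show PySem.List.pyGetD ['.'] (0 : Int) ' ' = '.' from rfl,
      mem_proj_empty]
    constructor
    · intro h
      exact ⟨0, by omega⟩
    · rintro ⟨i, hi⟩
      omega
  · simp [PySem.Set.contains_iff,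
      PySem.Dict.getD_insert,
      List.filter_cons,
      List.filter_nil,
      show PySem.List.pyGetD [a] (0 : Int) ' ' = a from rfl,
      beq_eq_false_iff_ne.mpr ha,
      ha,
      mem_proj_gen l 1 [0] _ (by intro j hj; simp at hj; omega)]

theorem testB_two (l : List Char) (a b : Char) :
    testB l 2 [a, b] = true ↔
      ∃ i : Nat, i + 2 ≤ l.length ∧ (a = '.' ∨ a = l.getD i ' ') ∧ (b = '.' ∨ b = l.getD (i + 1) ' ') := by
  have hr : PySem.List.pyRange 0 (2 : Int) 1 = [0, 1] := by decide
  unfold testB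
  rw [hr, projB_eq]
  by_cases ha : a = '.' <;> by_cases hb : b = '.'
  · subst ha
    subst hb
    simp [PySem.Set.contains_iff,
      PySem.Dict.getD_insert,
      List.filter_cons,
      List.filter_nil,
      show PySem.List.pyGetD ['.', '.'] (0 : Int) ' ' = '.' from rfl,
      show PySem.List.pyGetD ['.', '.'] (1 : Int) ' ' = '.' from rfl,
      mem_proj_empty]
    constructor
    · intro h
      exact ⟨0, by omega⟩
    · rintro ⟨i, hi⟩
      omega
  · subst ha
    simp [PySem.Set.contains_iff,
      PySem.Dict.getD_insert,
      List.filter_cons,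
      List.filter_nil,
      show PySem.List.pyGetD ['.', b] (0 : Int) ' ' = '.' from rfl,
      show PySem.List.pyGetD ['.', b] (1 : Int) ' ' = b from rfl,
      beq_eq_false_iff_ne.mpr hb,
      hb,
      mem_proj_gen l 2 [1] _ (by intro j hj; simp at hj; omega)]
    constructor
    · rintro ⟨i, hi, he⟩
      exact ⟨i, by omega, by simpa using he⟩
    · rintro ⟨i, hi, he⟩
      exact ⟨i, by omega, by simpa using he⟩
  · subst hb
    simp [PySem.Set.contains_iff,
      PySem.Dict.getD_insert,
      List.filter_cons,
      List.filter_nil,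
      show PySem.List.pyGetD [a, '.'] (0 : Int) ' ' = a from rfl,
      show PySem.List.pyGetD [a, '.'] (1 : Int) ' ' = '.' from rfl,
      beq_eq_false_iff_ne.mpr ha,
      ha,
      mem_proj_gen l 2 [0] _ (by intro j hj; simp at hj; omega)]
    constructor
    · rintro ⟨i, hi, he⟩
      exact ⟨i, by omega, by simpa using he⟩
    · rintro ⟨i, hi, he⟩
      exact ⟨i, by omega, by simpa using he⟩
  · simp [PySem.Set.contains_iff,
      PySem.Dict.getD_insert,
      List.filter_cons,
      List.filter_nil,
      show PySem.List.pyGetD [a, b] (0 : Int) ' ' = a from rfl,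
      show PySem.List.pyGetD [a, b] (1 : Int) ' ' = b from rfl,
      beq_eq_false_iff_ne.mpr ha,
      beq_eq_false_iff_ne.mpr hb,
      ha,
      hb,
      mem_proj_gen l 2 [0, 1] _ (by intro j hj; simp at hj; omega)]
    constructor
    · rintro ⟨i, hi, he⟩
      exact ⟨i, by omega, by simpa using he⟩
    · rintro ⟨i, hi, he⟩
      exact ⟨i, by omega, by simpa using he⟩

theorem testB_three (l : List Char) (a b c : Char) :
    testB l 3 [a, b, c] = true ↔
      ∃ i : Nat, i + 3 ≤ l.length ∧ (a = '.' ∨ a = l.getD i ' ') ∧ (b = '.' ∨ b = l.getD (i + 1) ' ') ∧ (c = '.' ∨ c = l.getD (i + 2) ' ') := by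
  have hr : PySem.List.pyRange 0 (3 : Int) 1 = [0, 1, 2] := by decide
  unfold testB
  rw [hr, projB_eq]
  by_cases ha : a = '.' <;> by_cases hb : b = '.' <;> by_cases hc : c = '.'
  · subst ha
    subst hb
    subst hc
    simp [PySem.Set.contains_iff,
      PySem.Dict.getD_insert,
      List.filter_cons,
      List.filter_nil,
      show PySem.List.pyGetD ['.', '.', '.'] (0 : Int) ' ' = '.' from rfl,
      show PySem.List.pyGetD ['.', '.', '.'] (1 : Int) ' ' = '.' from rfl,
      show PySem.List.pyGetD ['.', '.', '.'] (2 : Int) ' ' = '.' from rfl,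
      mem_proj_empty]
    constructor
    · intro h
      exact ⟨0, by omega⟩
    · rintro ⟨i, hi⟩
      omega
  · subst ha
    subst hb
    simp [PySem.Set.contains_iff,
      PySem.Dict.getD_insert,
      List.filter_cons,
      List.filter_nil,
      show PySem.List.pyGetD ['.', '.', c] (0 : Int) ' ' = '.' from rfl,
      show PySem.List.pyGetD ['.', '.', c] (1 : Int) ' ' = '.' from rfl,
      show PySem.List.pyGetD ['.', '.', c] (2 : Int) ' ' = c from rfl,
      beq_eq_false_iff_ne.mpr hc,
      hc,
      mem_proj_gen l 3 [2] _ (by intro j hj; simp at hj; omega)]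
    constructor
    · rintro ⟨i, hi, he⟩
      exact ⟨i, by omega, by simpa using he⟩
    · rintro ⟨i, hi, he⟩
      exact ⟨i, by omega, by simpa using he⟩
  · subst ha
    subst hc
    simp [PySem.Set.contains_iff,
      PySem.Dict.getD_insert,
      List.filter_cons,
      List.filter_nil,
      show PySem.List.pyGetD ['.', b, '.'] (0 : Int) ' ' = '.' from rfl,
      show PySem.List.pyGetD ['.', b, '.'] (1 : Int) ' ' = b from rfl,
      show PySem.List.pyGetD ['.', b, '.'] (2 : Int) ' ' = '.' from rfl,
      beq_eq_false_iff_ne.mpr hb,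
      hb,
      mem_proj_gen l 3 [1] _ (by intro j hj; simp at hj; omega)]
    constructor
    · rintro ⟨i, hi, he⟩
      exact ⟨i, by omega, by simpa using he⟩
    · rintro ⟨i, hi, he⟩
      exact ⟨i, by omega, by simpa using he⟩
  · subst ha
    simp [PySem.Set.contains_iff,
      PySem.Dict.getD_insert,
      List.filter_cons,
      List.filter_nil,
      show PySem.List.pyGetD ['.', b, c] (0 : Int) ' ' = '.' from rfl,
      show PySem.List.pyGetD ['.', b, c] (1 : Int) ' ' = b from rfl,
      show PySem.List.pyGetD ['.', b, c] (2 : Int) ' ' = c from rfl,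
      beq_eq_false_iff_ne.mpr hb,
      beq_eq_false_iff_ne.mpr hc,
      hb,
      hc,
      mem_proj_gen l 3 [1, 2] _ (by intro j hj; simp at hj; omega)]
    constructor
    · rintro ⟨i, hi, he⟩
      exact ⟨i, by omega, by simpa using he⟩
    · rintro ⟨i, hi, he⟩
      exact ⟨i, by omega, by simpa using he⟩
  · subst hb
    subst hc
    simp [PySem.Set.contains_iff,
      PySem.Dict.getD_insert,
      List.filter_cons,
      List.filter_nil,
      show PySem.List.pyGetD [a, '.', '.'] (0 : Int) ' ' = a from rfl,
      show PySem.List.pyGetD [a, '.', '.'] (1 : Int) ' ' = '.' from rfl,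
      show PySem.List.pyGetD [a, '.', '.'] (2 : Int) ' ' = '.' from rfl,
      beq_eq_false_iff_ne.mpr ha,
      ha,
      mem_proj_gen l 3 [0] _ (by intro j hj; simp at hj; omega)]
    constructor
    · rintro ⟨i, hi, he⟩
      exact ⟨i, by omega, by simpa using he⟩
    · rintro ⟨i, hi, he⟩
      exact ⟨i, by omega, by simpa using he⟩
  · subst hb
    simp [PySem.Set.contains_iff,
      PySem.Dict.getD_insert,
      List.filter_cons,
      List.filter_nil,
      show PySem.List.pyGetD [a, '.', c] (0 : Int) ' ' = a from rfl,
      show PySem.List.pyGetD [a, '.', c] (1 : Int) ' ' = '.' from rfl,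
      show PySem.List.pyGetD [a, '.', c] (2 : Int) ' ' = c from rfl,
      beq_eq_false_iff_ne.mpr ha,
      beq_eq_false_iff_ne.mpr hc,
      ha,
      hc,
      mem_proj_gen l 3 [0, 2] _ (by intro j hj; simp at hj; omega)]
    constructor
    · rintro ⟨i, hi, he⟩
      exact ⟨i, by omega, by simpa using he⟩
    · rintro ⟨i, hi, he⟩
      exact ⟨i, by omega, by simpa using he⟩
  · subst hc
    simp [PySem.Set.contains_iff,
      PySem.Dict.getD_insert,
      List.filter_cons,
      List.filter_nil,
      show PySem.List.pyGetD [a, b, '.'] (0 : Int) ' ' = a from rfl,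
      show PySem.List.pyGetD [a, b, '.'] (1 : Int) ' ' = b from rfl,
      show PySem.List.pyGetD [a, b, '.'] (2 : Int) ' ' = '.' from rfl,
      beq_eq_false_iff_ne.mpr ha,
      beq_eq_false_iff_ne.mpr hb,
      ha,
      hb,
      mem_proj_gen l 3 [0, 1] _ (by intro j hj; simp at hj; omega)]
    constructor
    · rintro ⟨i, hi, he⟩
      exact ⟨i, by omega, by simpa using he⟩
    · rintro ⟨i, hi, he⟩
      exact ⟨i, by omega, by simpa using he⟩
  · simp [PySem.Set.contains_iff,
      PySem.Dict.getD_insert,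
      List.filter_cons,
      List.filter_nil,
      show PySem.List.pyGetD [a, b, c] (0 : Int) ' ' = a from rfl,
      show PySem.List.pyGetD [a, b, c] (1 : Int) ' ' = b from rfl,
      show PySem.List.pyGetD [a, b, c] (2 : Int) ' ' = c from rfl,
      beq_eq_false_iff_ne.mpr ha,
      beq_eq_false_iff_ne.mpr hb,
      beq_eq_false_iff_ne.mpr hc,
      ha,
      hb,
      hc,
      mem_proj_gen l 3 [0, 1, 2] _ (by intro j hj; simp at hj; omega)]
    constructor
    · rintro ⟨i, hi, he⟩
      exact ⟨i, by omega, by simpa using he⟩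
    · rintro ⟨i, hi, he⟩
      exact ⟨i, by omega, by simpa using he⟩

theorem eq_two_of_len (p : List Char) (h : p.length = 2) : ∃ a b, p = [a, b] := by
  match p, h with
  | [a, b], _ => exact ⟨a, b, rfl⟩

theorem eq_three_of_len (p : List Char) (h : p.length = 3) : ∃ a b c, p = [a, b, c] := by
  match p, h with
  | [a, b, c], _ => exact ⟨a, b, c, rfl⟩

theorem getD_mem (l : List Char) (j : Nat) (h : j < l.length) : l.getD j ' ' ∈ l := by
  rw [List.getD_eq_getElem l ' ' h]
  exact List.getElem_mem h

-- the three filtered candidate lists, matched with PatP's three clauses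
theorem filt1_mem (l : List Char) (hl : l ≠ []) (p : List Char) :
    p ∈ (candsB l 1).filter (testB l 1) ↔
      (p = ['.'] ∨ ∃ j : Nat, j + 1 ≤ l.length ∧ p = [l.getD j ' ']) := by
  have hlen : 1 ≤ l.length := List.length_pos_iff.2 hl
  rw [List.mem_filter, mem_candsB]
  constructor
  · rintro ⟨⟨h1, hchars⟩, ht⟩
    rcases List.length_eq_one_iff.1 h1 with ⟨a, rfl⟩
    rcases (testB_one l a).1 ht with ⟨i, hi, (rfl | rfl)⟩
    · exact .inl rfl
    · exact .inr ⟨i, hi, rfl⟩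
  · rintro (rfl | ⟨j, hj, rfl⟩)
    · exact ⟨⟨rfl, by simp⟩, (testB_one l '.').2 ⟨0, by omega, .inl rfl⟩⟩
    · exact ⟨⟨rfl, by simpa using .inl (getD_mem l j (by omega))⟩,
        (testB_one l _).2 ⟨j, hj, .inr rfl⟩⟩

theorem filt2_mem (l : List Char) (p : List Char) :
    p ∈ (candsB l 2).filter (testB l 2) ↔
      ∃ j : Nat, j + 2 ≤ l.length ∧
        p ∈ [[l.getD j ' ', l.getD (j+1) ' '], [l.getD j ' ', '.'],
             ['.', l.getD (j+1) ' '], ['.', '.']] := by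
  rw [List.mem_filter, mem_candsB]
  constructor
  · rintro ⟨⟨h2, hchars⟩, ht⟩
    obtain ⟨a, b, rfl⟩ := eq_two_of_len p h2
    rcases (testB_two l a b).1 ht with ⟨i, hi, (rfl | rfl), (rfl | rfl)⟩
    · exact ⟨i, hi, by simp⟩
    · exact ⟨i, hi, by simp⟩
    · exact ⟨i, hi, by simp⟩
    · exact ⟨i, hi, by simp⟩
  · rintro ⟨j, hj, hp⟩
    have hj0 : l[j]?.getD ' ' ∈ l := getD_mem l j (by omega)
    have hj1 : l[j+1]?.getD ' ' ∈ l := getD_mem l (j+1) (by omega)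
    simp only [List.mem_cons, List.not_mem_nil, or_false] at hp
    rcases hp with rfl | rfl | rfl | rfl
    · exact ⟨⟨rfl, by simp [hj0, hj1]⟩, (testB_two l _ _).2 ⟨j, hj, .inr rfl, .inr rfl⟩⟩
    · exact ⟨⟨rfl, by simp [hj0]⟩, (testB_two l _ _).2 ⟨j, hj, .inr rfl, .inl rfl⟩⟩
    · exact ⟨⟨rfl, by simp [hj1]⟩, (testB_two l _ _).2 ⟨j, hj, .inl rfl, .inr rfl⟩⟩
    · exact ⟨⟨rfl, by simp⟩, (testB_two l _ _).2 ⟨j, hj, .inl rfl, .inl rfl⟩⟩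

theorem filt3_mem (l : List Char) (p : List Char) :
    p ∈ (candsB l 3).filter (testB l 3) ↔
      ∃ j : Nat, j + 3 ≤ l.length ∧
        p ∈ [[l.getD j ' ', l.getD (j+1) ' ', l.getD (j+2) ' '],
             ['.', l.getD (j+1) ' ', l.getD (j+2) ' '],
             [l.getD j ' ', '.', l.getD (j+2) ' '],
             [l.getD j ' ', l.getD (j+1) ' ', '.'],
             ['.', '.', l.getD (j+2) ' '],
             ['.', l.getD (j+1) ' ', '.'],
             [l.getD j ' ', '.', '.'],
             ['.', '.', '.']] := by
  rw [List.mem_filter, mem_candsB]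
  constructor
  · rintro ⟨⟨h3, hchars⟩, ht⟩
    obtain ⟨a, b, c, rfl⟩ := eq_three_of_len p h3
    rcases (testB_three l a b c).1 ht with ⟨i, hi, (rfl | rfl), (rfl | rfl), (rfl | rfl)⟩
    · exact ⟨i, hi, by simp⟩
    · exact ⟨i, hi, by simp⟩
    · exact ⟨i, hi, by simp⟩
    · exact ⟨i, hi, by simp⟩
    · exact ⟨i, hi, by simp⟩
    · exact ⟨i, hi, by simp⟩
    · exact ⟨i, hi, by simp⟩
    · exact ⟨i, hi, by simp⟩
  · rintro ⟨j, hj, hp⟩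
    have hj0 : l[j]?.getD ' ' ∈ l := getD_mem l j (by omega)
    have hj1 : l[j+1]?.getD ' ' ∈ l := getD_mem l (j+1) (by omega)
    have hj2 : l[j+2]?.getD ' ' ∈ l := getD_mem l (j+2) (by omega)
    simp only [List.mem_cons, List.not_mem_nil, or_false] at hp
    rcases hp with rfl | rfl | rfl | rfl | rfl | rfl | rfl | rfl
    · exact ⟨⟨rfl, by simp [hj0, hj1, hj2]⟩,
        (testB_three l _ _ _).2 ⟨j, hj, .inr rfl, .inr rfl, .inr rfl⟩⟩
    · exact ⟨⟨rfl, by simp [hj1, hj2]⟩,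
        (testB_three l _ _ _).2 ⟨j, hj, .inl rfl, .inr rfl, .inr rfl⟩⟩
    · exact ⟨⟨rfl, by simp [hj0, hj2]⟩,
        (testB_three l _ _ _).2 ⟨j, hj, .inr rfl, .inl rfl, .inr rfl⟩⟩
    · exact ⟨⟨rfl, by simp [hj0, hj1]⟩,
        (testB_three l _ _ _).2 ⟨j, hj, .inr rfl, .inr rfl, .inl rfl⟩⟩
    · exact ⟨⟨rfl, by simp [hj2]⟩,
        (testB_three l _ _ _).2 ⟨j, hj, .inl rfl, .inl rfl, .inr rfl⟩⟩
    · exact ⟨⟨rfl, by simp [hj1]⟩,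
        (testB_three l _ _ _).2 ⟨j, hj, .inl rfl, .inr rfl, .inl rfl⟩⟩
    · exact ⟨⟨rfl, by simp [hj0]⟩,
        (testB_three l _ _ _).2 ⟨j, hj, .inr rfl, .inl rfl, .inl rfl⟩⟩
    · exact ⟨⟨rfl, by simp⟩,
        (testB_three l _ _ _).2 ⟨j, hj, .inl rfl, .inl rfl, .inl rfl⟩⟩

theorem len_of_mem_filt (l : List Char) (L : Nat) (p : List Char)
    (h : p ∈ (candsB l L).filter (testB l L)) : p.length = L :=
  ((mem_candsB l L p).1 (List.mem_of_mem_filter h)).1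

theorem keys_perm_filts (l : List Char) (hl : l ≠ []) :
    ((dictA l).keys).Perm
      (((candsB l 1).filter (testB l 1) ++ (candsB l 2).filter (testB l 2)) ++
        (candsB l 3).filter (testB l 3)) := by
  apply (List.perm_ext_iff_of_nodup (nodup_dictA l) ?_).2
  · intro k
    rw [mem_dictA]
    unfold PatP
    simp only [List.mem_append, filt1_mem l hl, filt2_mem l, filt3_mem l, or_assoc]
  · have d12 : ((candsB l 1).filter (testB l 1)).Disjoint ((candsB l 2).filter (testB l 2)) := by
      intro p h1 h2
      have := len_of_mem_filt l 1 p h1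
      have := len_of_mem_filt l 2 p h2
      omega
    have d13 : ((candsB l 1).filter (testB l 1)).Disjoint ((candsB l 3).filter (testB l 3)) := by
      intro p h1 h2
      have := len_of_mem_filt l 1 p h1
      have := len_of_mem_filt l 3 p h2
      omega
    have d23 : ((candsB l 2).filter (testB l 2)).Disjoint ((candsB l 3).filter (testB l 3)) := by
      intro p h1 h2
      have := len_of_mem_filt l 2 p h1
      have := len_of_mem_filt l 3 p h2
      omega
    refine List.Nodup.append (List.Nodup.append ((nodup_candsB l 1).filter _)
      ((nodup_candsB l 2).filter _) d12) ((nodup_candsB l 3).filter _) ?_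
    intro p hp
    rcases List.mem_append.1 hp with h | h
    · exact d13 h
    · exact d23 h

-- ===== VERDICT (by name: the statements are the Claim_ definitions above) =====
theorem solve_spec : Claim_unchanged_solve := by
  intro s _ hD
  have hl : s.toList ≠ [] := by
    intro h
    exact hD (String.toList_eq_nil_iff.1 h)
  rw [solve_eq_dictA, solve_alt_eq,
    PySem.List.foldl_count_if, PySem.List.foldl_count_if, PySem.List.foldl_count_if]
  have hperm := keys_perm_filts s.toList hl
  have hlen := hperm.length_eq
  simp only [List.length_append, List.countP_eq_length_filter] at *
  simp only [PySem.Dict.keys, List.length_map] at hlen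
  simp only [PySem.Dict.size]
  omega

theorem solve_changed : Claim_changed_solve := by
  unfold Claim_changed_solve; decide

theorem solve_tight : Claim_exact_solve := by
  intro s _ hD
  unfold D_solve at hD
  subst hD
  decide
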